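-- pv_equiv track=rewrite | github.com/AcWiz/awesome-ocean-da | scripts/regenerate_main_readme.py | generate_year_browse_section
-- ===== SOURCE A (Python) =====
-- from collections import defaultdict
--
-- def generate_year_browse_section(papers):
--     """生成按年份浏览部分"""
--     by_year = defaultdict(list)
--     for p in papers:
--         by_year[p['year']].append(p)
--
--     lines = []
--     lines.append("## 按年份浏览")
--     lines.append("")
--     lines.append("| 年份 | 论文数 | 浏览 |")
--     lines.append("|------|--------|------|")
--
--     for year in sorted(by_year.keys(), reverse=True):
--         count = len(by_year[year])
--         lines.append(f"| {year} | {count} | [浏览](./papers/{year}/index.md) |")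
--
--     lines.append("")
--     lines.append("---")
--     lines.append("")
--
--     return lines
-- ===== SOURCE B (Python) =====
-- def generate_year_browse_section(papers):
--     """生成按年份浏览部分 (sort-then-scan: descending sort + two-pointer run scan instead of dict grouping)"""
--     sp = sorted(papers, key=lambda p: p['year'], reverse=True)
--     lines = ["## 按年份浏览", "", "| 年份 | 论文数 | 浏览 |", "|------|--------|------|"]
--     i, n = 0, len(sp)
--     while i < n:
--         y = sp[i]['year']
--         j = i + 1
--         while j < n and sp[j]['year'] == y:
--             j += 1
--         lines.append(f"| {y} | {j - i} | [浏览](./papers/{y}/index.md) |")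
--         i = j
--     lines.extend(["", "---", ""])
--     return lines
-- ===== Notes on version B (the rewrite author's own statement) =====
-- stated objective: alternative
-- what changed: B replaces A's defaultdict grouping plus separate key sort with a single descending sort of the papers followed by a two-pointer scan over consecutive equal-year runs, emitting each row directly from the run length.
import Mathlib
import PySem

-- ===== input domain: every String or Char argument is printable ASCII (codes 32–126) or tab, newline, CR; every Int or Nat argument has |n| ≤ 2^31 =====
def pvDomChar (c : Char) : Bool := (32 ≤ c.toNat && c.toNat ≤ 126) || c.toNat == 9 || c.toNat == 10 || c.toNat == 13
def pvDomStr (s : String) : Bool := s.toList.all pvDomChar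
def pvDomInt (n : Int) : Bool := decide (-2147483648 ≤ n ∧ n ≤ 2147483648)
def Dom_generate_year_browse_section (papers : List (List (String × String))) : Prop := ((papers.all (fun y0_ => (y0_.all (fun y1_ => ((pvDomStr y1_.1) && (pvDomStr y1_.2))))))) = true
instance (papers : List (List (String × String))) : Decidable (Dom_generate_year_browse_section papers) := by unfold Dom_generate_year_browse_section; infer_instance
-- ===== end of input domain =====

-- B changes the decomposition: one descending sort of the papers + a consecutive-run scan,
-- instead of A's dict grouping followed by a key sort (objective: alternative, same cost).

-- p['year'] as a first-match lookup; Pre_ guarantees the key is present, so the default is never read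
def pvYear (p : List (String × String)) : String :=
  (PySem.Dict.mk p).getD "year" ""

-- the shared f-string row (identical in both Pythons)
def pvRow (year : String) (count : Int) : String :=
  "| " ++ year ++ " | " ++ PySem.Int.toStr count ++ " | [浏览](./papers/" ++ year ++ "/index.md) |"

-- ===== PORT A =====
def generate_year_browse_section (papers : List (List (String × String))) : List String :=
  let by_year : PySem.Dict String (List (List (String × String))) :=
    papers.foldl (fun d p => d.modify (pvYear p) [] (· ++ [p])) PySem.Dict.empty
  let lines : List String :=
    ["## 按年份浏览", "", "| 年份 | 论文数 | 浏览 |", "|------|--------|------|"]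
  let lines := lines ++
    (PySem.List.sorted by_year.keys (fun x => x) true).map
      (fun year => pvRow year (((by_year.getD year []).length : Int)))
  lines ++ ["", "---", ""]

-- ===== PORT B =====
-- the inner `while j < n and sp[j]['year'] == y` run scan = takeWhile; `i = j` = dropWhile
def pvRuns (l : List (List (String × String))) : List String :=
  match l with
  | [] => []
  | p :: rest =>
    let y := pvYear p
    pvRow y (1 + ((rest.takeWhile (fun q => pvYear q == y)).length : Int)) ::
      pvRuns (rest.dropWhile (fun q => pvYear q == y))
termination_by l.length
decreasing_by
  have := List.length_dropWhile_le (fun q => pvYear q == pvYear p) rest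
  simp; omega

def generate_year_browse_section_alt (papers : List (List (String × String))) : List String :=
  let sp := PySem.List.sorted papers pvYear true
  ["## 按年份浏览", "", "| 年份 | 论文数 | 浏览 |", "|------|--------|------|"] ++
    pvRuns sp ++ ["", "---", ""]

-- ===== PRECONDITION & SPEC =====
-- Pre_ excludes exactly the inputs where Python A raises KeyError: a paper without a 'year' key.
def Pre_generate_year_browse_section (papers : List (List (String × String))) : Prop :=
  papers.all (fun p => (PySem.Dict.mk p).contains "year") = true
instance (papers : List (List (String × String))) : Decidable (Pre_generate_year_browse_section papers) := by unfold Pre_generate_year_browse_section; infer_instance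

def pvWitness_generate_year_browse_section : (List (List (String × String))) :=
  [[("year", "2024")], [("year", "2023"), ("title", "t")], [("year", "2024")]]

def Spec_generate_year_browse_section (papers : List (List (String × String))) (out : List String) : Prop := out = generate_year_browse_section_alt papers
instance (papers : List (List (String × String))) (out : List String) : Decidable (Spec_generate_year_browse_section papers out) := by unfold Spec_generate_year_browse_section; infer_instance

-- ===== CLAIM (what is proved, stated in full; the proofs are below) =====
def Claim_equal_generate_year_browse_section : Prop := ∀ (papers : List (List (String × String))), Dom_generate_year_browse_section papers → Pre_generate_year_browse_section papers → Spec_generate_year_browse_section papers (generate_year_browse_section papers)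

-- ===== LEMMAS AND PROOFS =====

-- foldl over Set.add starting from a set headed by y, when y never occurs in l, keeps y in front
lemma pv_foldl_add_cons (l : List String) :
    ∀ (s : List String) (y : String), y ∉ l →
    List.foldl PySem.Set.add (y :: s) l = y :: List.foldl PySem.Set.add s l := by
  induction l with
  | nil => intro s y _; rfl
  | cons x t ih =>
    intro s y hy
    have hxy : ¬ (x = y) := fun h => hy (by simp [h])
    simp only [List.foldl_cons]
    have hc : PySem.Set.add (y :: s) x = y :: PySem.Set.add s x := by
      simp [PySem.Set.add, PySem.Set.contains, hxy]
      split_ifs <;> simp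
    rw [hc, ih _ y (fun h => hy (List.mem_cons_of_mem _ h))]

-- absorbing a run of copies of y into a set that already contains y in front
lemma pv_foldl_add_run (run : List String) :
    ∀ (s : List String) (y : String), (∀ z ∈ run, z = y) →
    List.foldl PySem.Set.add (y :: s) run = y :: s := by
  induction run with
  | nil => intro s y _; rfl
  | cons x t ih =>
    intro s y h
    have hx : x = y := h x (by simp)
    simp only [List.foldl_cons]
    have : PySem.Set.add (y :: s) x = y :: s := by
      simp [PySem.Set.add, PySem.Set.contains, hx]
    rw [this, ih s y (fun z hz => h z (by simp [hz]))]

lemma pv_dedup_run (y : String) (run l : List String)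
    (h1 : ∀ z ∈ run, z = y) (h2 : y ∉ l) :
    PySem.List.dedup (y :: (run ++ l)) = y :: PySem.List.dedup l := by
  have e : ∀ m : List String, PySem.List.dedup m = List.foldl PySem.Set.add [] m := by
    intro m; rfl
  rw [e, e]
  simp only [List.foldl_cons, List.foldl_append]
  have h0 : PySem.Set.add [] y = [y] := rfl
  rw [h0, pv_foldl_add_run run [] y h1, pv_foldl_add_cons l [] y h2]

-- the deduplication of a list is a sublist of it
lemma pv_foldl_add_sublist (l : List String) :
    ∀ s : List String, ∃ t, List.foldl PySem.Set.add s l = s ++ t ∧ t.Sublist l := by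
  induction l with
  | nil => intro s; exact ⟨[], by simp⟩
  | cons x t ih =>
    intro s
    by_cases hx : x ∈ s
    · obtain ⟨u, hu, hsub⟩ := ih s
      refine ⟨u, ?_, hsub.cons x⟩
      simp only [List.foldl_cons]
      have : PySem.Set.add s x = s := by simp [PySem.Set.add, PySem.Set.contains, hx]
      rw [this, hu]
    · obtain ⟨u, hu, hsub⟩ := ih (s ++ [x])
      refine ⟨x :: u, ?_, hsub.cons₂ x⟩
      simp only [List.foldl_cons]
      have : PySem.Set.add s x = s ++ [x] := by simp [PySem.Set.add, PySem.Set.contains, hx]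
      rw [this, hu]; simp

lemma pv_dedup_sublist (l : List String) : (PySem.List.dedup l).Sublist l := by
  obtain ⟨t, ht, hsub⟩ := pv_foldl_add_sublist l []
  have : PySem.List.dedup l = List.foldl PySem.Set.add [] l := rfl
  rw [this, ht]; simpa using hsub

-- the head of dropWhile fails the predicate
lemma pv_dropWhile_head (l : List (List (String × String))) (p : List (String × String) → Bool)
    (q : List (String × String)) (t : List (List (String × String)))
    (h : l.dropWhile p = q :: t) : p q = false := by
  induction l with
  | nil => simp at h
  | cons x xs ih =>
    rw [List.dropWhile_cons] at h
    by_cases hx : p x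
    · exact ih (by simpa [hx] using h)
    · simp [hx] at h
      rw [← h.1]
      exact eq_false_of_ne_true hx

-- the run scan of a year-descending list produces one row per distinct year, with its multiplicity
lemma pv_runs_eq (L : List (List (String × String)))
    (h : (L.map pvYear).Pairwise (· ≥ ·)) :
    pvRuns L = (PySem.List.dedup (L.map pvYear)).map
      (fun y => pvRow y (((L.map pvYear).count y : Nat) : Int)) := by
  fun_induction pvRuns L with
  | case1 => simp [PySem.List.dedup, PySem.Set.ofList]
  | case2 p rest y ih =>
    have hrest : rest.takeWhile (fun q => pvYear q == y) ++ rest.dropWhile (fun q => pvYear q == y) = rest :=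
      List.takeWhile_append_dropWhile
    have hgy : ∀ z ∈ (rest.takeWhile (fun q => pvYear q == y)).map pvYear, z = y := by
      intro z hz
      obtain ⟨q, hq, rfl⟩ := List.mem_map.mp hz
      have hb := List.mem_takeWhile_imp hq
      exact eq_of_beq hb
    have hmapr : List.map pvYear rest
        = (rest.takeWhile (fun q => pvYear q == y)).map pvYear ++ (rest.dropWhile (fun q => pvYear q == y)).map pvYear := by
      rw [← List.map_append, hrest]
    have hcons : (List.map pvYear (p :: rest)).Pairwise (· ≥ ·) := h
    have hpair : (List.map pvYear rest).Pairwise (· ≥ ·) := (List.pairwise_cons.mp hcons).2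
    have hle : ∀ z ∈ List.map pvYear rest, z ≤ y := (List.pairwise_cons.mp hcons).1
    have hpr : ((rest.dropWhile (fun q => pvYear q == y)).map pvYear).Pairwise (· ≥ ·) := by
      rw [hmapr] at hpair
      exact (List.pairwise_append.mp hpair).2.1
    have hnotin : y ∉ (rest.dropWhile (fun q => pvYear q == y)).map pvYear := by
      cases hrlc : rest.dropWhile (fun q => pvYear q == y) with
      | nil => simp
      | cons q t =>
        have hqf : (pvYear q == y) = false := pv_dropWhile_head rest _ q t hrlc
        have hqy : pvYear q ≠ y := by simpa using hqf
        rw [List.map_cons]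
        intro hmem
        rcases List.mem_cons.mp hmem with h1 | h2
        · exact hqy h1.symm
        · have hq_le : pvYear q ≤ y := by
            apply hle
            rw [hmapr, hrlc]
            simp
          have hq_ge : y ≤ pvYear q := by
            rw [hrlc, List.map_cons] at hpr
            exact (List.pairwise_cons.mp hpr).1 _ h2
          exact hqy (le_antisymm hq_le hq_ge)
    have hcy : List.count y (List.map pvYear (p :: rest)) = 1 + (rest.takeWhile (fun q => pvYear q == y)).length := by
      rw [List.map_cons, hmapr, List.count_cons, List.count_append]
      have h1 : List.count y ((rest.takeWhile (fun q => pvYear q == y)).map pvYear)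
          = ((rest.takeWhile (fun q => pvYear q == y)).map pvYear).length :=
        List.count_eq_length.mpr (fun b hb => (hgy b hb).symm)
      have h2 : List.count y ((rest.dropWhile (fun q => pvYear q == y)).map pvYear) = 0 :=
        List.count_eq_zero.mpr hnotin
      rw [h1, h2, List.length_map]
      simp [y]
      omega
    have hdedup : PySem.List.dedup (List.map pvYear (p :: rest))
        = y :: PySem.List.dedup ((rest.dropWhile (fun q => pvYear q == y)).map pvYear) := by
      have hform : List.map pvYear (p :: rest)
          = y :: ((rest.takeWhile (fun q => pvYear q == y)).map pvYear ++ (rest.dropWhile (fun q => pvYear q == y)).map pvYear) := by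
        rw [List.map_cons, hmapr]
      rw [hform, pv_dedup_run y _ _ hgy hnotin]
    rw [hdedup, List.map_cons]
    congr 1
    · rw [hcy]
      push_cast
      ring_nf
    · rw [ih hpr]
      apply List.map_congr_left
      intro y' hy'
      have hy'mem : y' ∈ (rest.dropWhile (fun q => pvYear q == y)).map pvYear :=
        (PySem.List.mem_dedup _ _).mp hy'
      have hy'ne : y' ≠ y := fun hEq => hnotin (hEq ▸ hy'mem)
      have hcount : List.count y' (List.map pvYear (p :: rest))
          = List.count y' ((rest.dropWhile (fun q => pvYear q == y)).map pvYear) := by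
        rw [List.map_cons, hmapr, List.count_cons, List.count_append]
        have hg0 : List.count y' ((rest.takeWhile (fun q => pvYear q == y)).map pvYear) = 0 :=
          List.count_eq_zero.mpr (fun hm => hy'ne (hgy _ hm))
        have : (pvYear p == y') = false := by
          simp only [y] at hy'ne ⊢
          simp [Ne.symm hy'ne]
        rw [hg0, this]
        simp
      rw [hcount]

-- A's result, characterised: one row per distinct year, years sorted descending, counts by multiplicity
lemma pv_A_char (papers : List (List (String × String))) :
    generate_year_browse_section papers =
      ["## 按年份浏览", "", "| 年份 | 论文数 | 浏览 |", "|------|--------|------|"] ++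
      (PySem.List.sorted (PySem.Set.ofList (papers.map pvYear)) (fun x => x) true).map
        (fun y => pvRow y (((papers.map pvYear).count y : Nat) : Int)) ++ ["", "---", ""] := by
  unfold generate_year_browse_section
  have hkeys : (papers.foldl (fun d p => d.modify (pvYear p) [] (· ++ [p])) PySem.Dict.empty).keys
      = PySem.Set.ofList (papers.map pvYear) := by
    rw [PySem.Dict.keys_foldl_modify_key]
    rw [PySem.Dict.keys_empty, PySem.Set.update_nil_left]
  have hgetD : ∀ y, ((papers.foldl (fun d p => d.modify (pvYear p) [] (· ++ [p])) PySem.Dict.empty).getD y [])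
      = papers.filter (fun p => pvYear p == y) := by
    intro y
    have hfm : papers.foldl (fun d p => d.modify (pvYear p) [] (· ++ [p])) PySem.Dict.empty
        = (papers.map (fun p => (pvYear p, p))).foldl (fun d q => d.modify q.1 [] (· ++ [q.2])) PySem.Dict.empty := by
      rw [List.foldl_map]
    rw [hfm, PySem.Dict.getD_foldl_modify_append]
    simp [List.filter_map, List.map_map, Function.comp_def]
  dsimp only
  rw [hkeys]
  congr 1
  congr 1
  apply List.map_congr_left
  intro y hy
  rw [hgetD y]
  congr 1
  have hlen : (papers.filter (fun p => pvYear p == y)).length = (papers.map pvYear).count y := by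
    rw [List.count_eq_countP, List.countP_map, List.countP_eq_length_filter]
    rfl
  rw [hlen]

-- B's result, characterised the same way (run years = dedup of the sorted year list)
lemma pv_B_char (papers : List (List (String × String))) :
    generate_year_browse_section_alt papers =
      ["## 按年份浏览", "", "| 年份 | 论文数 | 浏览 |", "|------|--------|------|"] ++
      (PySem.List.dedup ((PySem.List.sorted papers pvYear true).map pvYear)).map
        (fun y => pvRow y (((papers.map pvYear).count y : Nat) : Int)) ++ ["", "---", ""] := by
  unfold generate_year_browse_section_alt
  have hpw : ((PySem.List.sorted papers pvYear true).map pvYear).Pairwise (· ≥ ·) :=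
    List.pairwise_map.mpr (PySem.List.sorted_pairwise_rev ..)
  dsimp only
  rw [pv_runs_eq _ hpw]
  congr 1
  congr 1
  apply List.map_congr_left
  intro y hy
  congr 1
  have : ((PySem.List.sorted papers pvYear true).map pvYear).count y = (papers.map pvYear).count y :=
    ((PySem.List.sorted_perm ..).map pvYear).count_eq y
  rw [this]

-- ===== VERDICT (by name: the statement is the Claim_ definition above) =====
theorem generate_year_browse_section_spec : Claim_equal_generate_year_browse_section := by
  intro papers _ _
  unfold Spec_generate_year_browse_section
  rw [pv_A_char, pv_B_char]
  have hd : PySem.List.sorted (PySem.Set.ofList (papers.map pvYear)) (fun x => x) true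
      = PySem.List.dedup ((PySem.List.sorted papers pvYear true).map pvYear) := by
    apply PySem.List.sorted_rev_eq_of_perm_of_pairwise_gt
    · apply (List.perm_ext_iff_of_nodup (PySem.List.nodup_dedup _) (PySem.Set.nodup_ofList _)).mpr
      intro a
      rw [PySem.List.mem_dedup, PySem.Set.mem_ofList]
      constructor
      · intro ha
        exact ((PySem.List.sorted_perm ..).map pvYear).mem_iff.mp ha
      · intro ha
        exact ((PySem.List.sorted_perm ..).map pvYear).mem_iff.mpr ha
    · have hsub := pv_dedup_sublist ((PySem.List.sorted papers pvYear true).map pvYear)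
      have hpw : ((PySem.List.sorted papers pvYear true).map pvYear).Pairwise (· ≥ ·) :=
        List.pairwise_map.mpr (PySem.List.sorted_pairwise_rev ..)
      have hge := hpw.sublist hsub
      have hne : (PySem.List.dedup ((PySem.List.sorted papers pvYear true).map pvYear)).Pairwise (· ≠ ·) :=
        PySem.List.nodup_dedup _
      exact (hge.and hne).imp (fun hab => lt_of_le_of_ne hab.1 (Ne.symm hab.2))
  rw [hd]
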